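-- pv_equiv track=rewrite | github.com/tiagosathler/logic-exercises | hackerrank/trybe/src/c08_caixa.py | caixa
-- ===== SOURCE A (Python) =====
-- from collections import deque
-- from typing import List
--
-- def caixa(arg: int, seq: List[int]) -> int:
--     """Uma atendente de supermercado deve lançar os valores
--     dos produtos à medida que os passa no caixa.
--     Eventualmente ele faz um lançamento errado e para
--     invalidá-lo deve lançar o valor 0 (zero) para que
--     o registro anterior não seja considerado.
--     Na eventualidade de mais de um valor ser lançado errado
--     consecutivamente o atendente lançará tantos valores zero
--     quanto necessários para apagar os registros incorretos.
--     Por exemplo, no lançamento: 1, 3, 5, 4, 0, 0, 7, 0, 0, 6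
--     serão considerados para a soma os valores 1 e 6,
--      visto que os valores 3, 5, 4 e 7 foram anulados pelos zeros.
--     Construa um algoritmo capaz de processar uma entrada de
--     n números e apresentar na saída a SOMA DOS REGISTROS VÁLIDOS.
--
--     Args:
--         arg (int): any positive integer - number of operations
--         seq (List[int]): input sequence
--
--     Returns:
--         int: sum of valid records
--     """
--     stack = deque()
--     for i in range(0, arg):
--         if seq[i] == 0:
--             stack.pop()
--         else:
--             stack.append(seq[i])
--     return sum(stack)
-- ===== SOURCE B (Python) =====
-- def caixa(arg, seq):
--     """Reverse traversal with a skip counter instead of a stack: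
--     a zero cancels the nearest following (in reverse order) nonzero entry."""
--     total = 0
--     skip = 0
--     for i in range(arg - 1, -1, -1):
--         v = seq[i]
--         if v == 0:
--             skip += 1
--         elif skip > 0:
--             skip -= 1
--         else:
--             total += v
--     return total
-- ===== Notes on version B (the rewrite author's own statement) =====
-- stated objective: simpler
-- what changed: Replaces the deque stack (push nonzeros, pop on zero, sum at the end) with a single reverse index loop keeping only an integer skip counter and a running total, so no intermediate container is built.
import Mathlib
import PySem

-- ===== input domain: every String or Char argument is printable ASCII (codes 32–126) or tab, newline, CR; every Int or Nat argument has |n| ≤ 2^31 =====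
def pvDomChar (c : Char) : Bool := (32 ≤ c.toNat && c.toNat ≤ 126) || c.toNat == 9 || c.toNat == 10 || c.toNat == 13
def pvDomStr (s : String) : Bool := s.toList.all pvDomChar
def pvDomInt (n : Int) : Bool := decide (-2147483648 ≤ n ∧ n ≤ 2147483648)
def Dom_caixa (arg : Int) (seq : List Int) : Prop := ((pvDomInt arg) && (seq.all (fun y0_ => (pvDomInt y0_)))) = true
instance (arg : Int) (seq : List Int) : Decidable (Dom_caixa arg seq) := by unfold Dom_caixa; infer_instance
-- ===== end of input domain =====

-- B replaces A's deque stack by a single reverse traversal with a skip counter and a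
-- running total (simpler: no intermediate container, constant extra space).

-- ===== PORT A =====
-- deque stack; none models the IndexError of pop-on-empty-deque / out-of-range seq[i]
def caixa (arg : Int) (seq : List Int) : Int :=
  match
    (PySem.List.pyRange 0 arg 1).foldl
      (fun (st : Option (List Int)) (i : Int) =>
        match st, PySem.List.pyGet? seq i with
        | some s, some v =>
          if v = 0 then
            (if s.isEmpty then none else some s.dropLast)
          else some (s ++ [v])
        | _, _ => none)
      (some []) with
  | some s => s.sum
  | none => 0

-- ===== PORT B =====
-- reverse index loop; state = (total, skip); pyGetD is exact here: inside Pre_ every index is in range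
def caixa_alt (arg : Int) (seq : List Int) : Int :=
  ((PySem.List.pyRange (arg - 1) (-1) (-1)).foldl
      (fun (st : Int × Int) (i : Int) =>
        let v := PySem.List.pyGetD seq i 0
        if v = 0 then (st.1, st.2 + 1)
        else if 0 < st.2 then (st.1, st.2 - 1)
        else (st.1 + v, st.2))
      (0, 0)).1

-- ===== PRECONDITION & SPEC =====
-- Pre_ excludes exactly the inputs where A raises IndexError: arg exceeding len(seq)
-- (seq[i] out of range) and prefixes of seq[:arg] with more zeros than nonzero entries
-- (pop from an empty deque).
def Pre_caixa (arg : Int) (seq : List Int) : Prop :=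
  arg ≤ (seq.length : Int) ∧
  ∀ k, k ≤ arg.toNat →
    (seq.take k).countP (fun v => v == 0) ≤ (seq.take k).countP (fun v => !(v == 0))
instance (arg : Int) (seq : List Int) : Decidable (Pre_caixa arg seq) := by
  unfold Pre_caixa; infer_instance

def pvWitness_caixa : Int × List Int := (2, [5, 0])

def Spec_caixa (arg : Int) (seq : List Int) (out : Int) : Prop := out = caixa_alt arg seq
instance (arg : Int) (seq : List Int) (out : Int) : Decidable (Spec_caixa arg seq out) := by
  unfold Spec_caixa; infer_instance

-- ===== CLAIM (what is proved, stated in full; the proofs are below) =====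
def Claim_equal_caixa : Prop := ∀ (arg : Int) (seq : List Int), Dom_caixa arg seq → Pre_caixa arg seq → Spec_caixa arg seq (caixa arg seq)

-- ===== LEMMAS AND PROOFS =====

-- the pure stack step of A, and B's step, as named functions for the proofs
def stkStep (s : List Int) (v : Int) : List Int := if v = 0 then s.dropLast else s ++ [v]
def gA (o : Option (List Int)) (v : Int) : Option (List Int) :=
  o.bind (fun s => if v = 0 then (if s.isEmpty then none else some s.dropLast) else some (s ++ [v]))
def bStep (st : Int × Int) (v : Int) : Int × Int :=
  if v = 0 then (st.1, st.2 + 1) else if 0 < st.2 then (st.1, st.2 - 1) else (st.1 + v, st.2)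

theorem foldl_range_take {β : Type} (seq : List Int) (g : β → Int → β) :
    ∀ (n : Nat), n ≤ seq.length → ∀ (init : β),
      (List.range n).foldl (fun st k => g st (seq.getD k 0)) init = (seq.take n).foldl g init := by
  intro n
  induction n with
  | zero => intro _ _; simp
  | succ n ih =>
    intro h init
    have hn : n < seq.length := by omega
    rw [List.range_succ, List.foldl_append, ih (by omega)]
    have hc : seq.take n ++ [seq[n]] = seq.take (n + 1) := by
      have hcg := List.take_concat_get (i := n) (l := seq) (h := hn)
      rw [List.concat_eq_append] at hcg
      exact hcg
    rw [← hc, List.foldl_append]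
    simp [List.getD_eq_getElem?_getD, List.getElem?_eq_getElem hn]

theorem foldr_range_take {β : Type} (seq : List Int) (g : β → Int → β) :
    ∀ (n : Nat), n ≤ seq.length → ∀ (init : β),
      (List.range n).foldr (fun k st => g st (seq.getD k 0)) init
        = (seq.take n).foldr (fun v st => g st v) init := by
  intro n
  induction n with
  | zero => intro _ _; simp
  | succ n ih =>
    intro h init
    have hn : n < seq.length := by omega
    rw [List.range_succ, List.foldr_append, List.take_add_one]
    simp only [List.foldr_append]
    rw [ih (by omega)]
    simp [List.getElem?_eq_getElem hn, List.getD_eq_getElem?_getD]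

theorem valid_optFold : ∀ (l : List Int) (s : List Int),
    (∀ k, k ≤ l.length →
        (l.take k).countP (fun v => v == 0) ≤ s.length + (l.take k).countP (fun v => !(v == 0))) →
    l.foldl gA (some s) = some (l.foldl stkStep s) := by
  intro l
  induction l with
  | nil => intro s _; simp
  | cons v l ih =>
    intro s h
    by_cases hv : v = 0
    · subst hv
      have h1 := h 1 (by simp)
      simp at h1
      have hlen : 1 ≤ s.length := by
        cases s with
        | nil => simp at h1
        | cons a t => simp
      have hne : s ≠ [] := by
        cases s with
        | nil => simp at hlen
        | cons a t => simp
      simp only [List.foldl_cons]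
      rw [show gA (some s) 0 = some s.dropLast by simp [gA, hne],
          show stkStep s 0 = s.dropLast by simp [stkStep]]
      refine ih s.dropLast (fun k hk => ?_)
      have h2 := h (k + 1) (by simpa using Nat.succ_le_succ hk)
      simp only [List.take_succ_cons, List.countP_cons] at h2
      simp only [List.length_dropLast]
      simp at h2
      omega
    · simp only [List.foldl_cons]
      rw [show gA (some s) v = some (s ++ [v]) by simp [gA, hv],
          show stkStep s v = s ++ [v] by simp [stkStep, hv]]
      refine ih (s ++ [v]) (fun k hk => ?_)
      have h2 := h (k + 1) (by simpa using Nat.succ_le_succ hk)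
      simp only [List.take_succ_cons, List.countP_cons] at h2
      have hb : (v == 0) = false := by simp [hv]
      rw [hb] at h2
      simp only [List.length_append, List.length_singleton]
      simp at h2
      omega

theorem bCore : ∀ (m : List Int) (t : Int) (k : Nat),
    (m.foldl bStep (t, (k : Int))).1
      = t + ((m.reverse.foldl stkStep []).take ((m.reverse.foldl stkStep []).length - k)).sum := by
  intro m
  induction m with
  | nil => intro t k; simp
  | cons v m ih =>
    intro t k
    have hrev : (v :: m).reverse.foldl stkStep [] = stkStep (m.reverse.foldl stkStep []) v := by
      rw [List.reverse_cons, List.foldl_append]; simp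
    set S := m.reverse.foldl stkStep [] with hS
    by_cases hv : v = 0
    · subst hv
      have hstep : bStep (t, (k : Int)) 0 = (t, ((k + 1 : Nat) : Int)) := by
        simp [bStep]
      rw [List.foldl_cons, hstep, ih t (k + 1), hrev]
      rw [show stkStep S 0 = S.dropLast by simp [stkStep]]
      congr 1
      rw [List.dropLast_eq_take, List.length_take, List.take_take]
      congr 2
      omega
    · by_cases hk : 0 < k
      · have hstep : bStep (t, (k : Int)) v = (t, ((k - 1 : Nat) : Int)) := by
          simp [bStep, hv]
          rw [if_pos (by exact_mod_cast hk)]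
          push_cast [hk]
          ring
        rw [List.foldl_cons, hstep, ih t (k - 1), hrev]
        rw [show stkStep S v = S ++ [v] by simp [stkStep, hv]]
        congr 1
        have hlen2 : (S ++ [v]).length - k = S.length - (k - 1) := by
          simp; omega
        rw [hlen2, List.take_append]
        have h0 : S.length - (k - 1) - S.length = 0 := by omega
        rw [h0]
        simp
      · have hk0 : k = 0 := by omega
        subst hk0
        have hstep : bStep (t, ((0 : Nat) : Int)) v = (t + v, ((0 : Nat) : Int)) := by
          simp [bStep, hv]
        rw [List.foldl_cons, hstep, ih (t + v) 0, hrev]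
        rw [show stkStep S v = S ++ [v] by simp [stkStep, hv]]
        simp [List.take_of_length_le, List.sum_append]
        ring

-- ===== VERDICT (by name: the statement is the Claim_ definition above) =====
theorem caixa_spec : Claim_equal_caixa := by
  intro arg seq _ hpre
  unfold Spec_caixa
  obtain ⟨hlen, hcnt⟩ := hpre
  by_cases hpos : 0 < arg
  · have hn : arg = ((arg.toNat : Nat) : Int) := by omega
    generalize hN : arg.toNat = n at *
    have hnlen : n ≤ seq.length := by omega
    -- A side
    have hA : caixa arg seq = ((seq.take n).foldl stkStep []).sum := by
      unfold caixa
      rw [PySem.List.pyRange_one]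
      have ht : (arg - 0).toNat = n := by omega
      rw [ht, List.foldl_map]
      have hcongrA :
          List.foldl
            (fun (x : Option (List Int)) (y : Nat) =>
              match x, PySem.List.pyGet? seq (0 + (y : Int)) with
              | some s, some v =>
                if v = 0 then (if s.isEmpty then none else some s.dropLast) else some (s ++ [v])
              | _, _ => none)
            (some []) (List.range n)
          = List.foldl (fun (st : Option (List Int)) (k : Nat) => gA st (seq.getD k 0))
              (some []) (List.range n) := by
        apply PySem.List.foldl_congr_mem
        intro st k hk
        have hkn : k < n := List.mem_range.mp hk
        have hkl : k < seq.length := by omega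
        simp only [zero_add, PySem.List.pyGet?_natCast, List.getElem?_eq_getElem hkl]
        cases st with
        | none => simp [gA]
        | some s => simp [gA, List.getD_eq_getElem?_getD, List.getElem?_eq_getElem hkl]
      rw [hcongrA, foldl_range_take seq gA n hnlen]
      rw [valid_optFold (seq.take n) []
        (by
          intro k hk
          have hk' : k ≤ n := by
            rw [List.length_take] at hk
            omega
          rw [List.take_take, min_eq_left hk']
          simpa using hcnt k (by omega))]
    -- B side
    have hB : caixa_alt arg seq = ((seq.take n).foldl stkStep []).sum := by
      unfold caixa_alt
      rw [PySem.List.pyRange_neg_one_eq_reverse]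
      have h1 : (-1 : Int) + 1 = 0 := by ring
      have h2 : arg - 1 + 1 = arg := by ring
      rw [h1, h2, PySem.List.pyRange_one]
      have ht : (arg - 0).toNat = n := by omega
      rw [ht, ← List.map_reverse, List.foldl_map]
      have hcongrB :
          List.foldl
            (fun (x : Int × Int) (y : Nat) =>
              have v := PySem.List.pyGetD seq (0 + (y : Int)) 0
              if v = 0 then (x.1, x.2 + 1) else if 0 < x.2 then (x.1, x.2 - 1) else (x.1 + v, x.2))
            (0, 0) (List.range n).reverse
          = List.foldl (fun (st : Int × Int) (k : Nat) => bStep st (seq.getD k 0))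
              (0, 0) (List.range n).reverse := by
        apply PySem.List.foldl_congr_mem
        intro st k _
        simp [bStep, PySem.List.pyGetD_natCast]
      rw [hcongrB, List.foldl_reverse]
      have h3 : ((0 : Int), (0 : Int)) = ((0 : Int), ((0 : Nat) : Int)) := by norm_num
      rw [h3, foldr_range_take seq bStep n hnlen]
      rw [← List.foldl_reverse]
      rw [bCore (seq.take n).reverse 0 0]
      simp
    rw [hA, hB]
  · have h1 : PySem.List.pyRange 0 arg 1 = [] := PySem.List.pyRange_one_eq_nil (by omega)
    have h2 : PySem.List.pyRange (arg - 1) (-1) (-1) = [] :=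
      PySem.List.pyRange_neg_one_eq_nil (by omega)
    simp [caixa, caixa_alt, h1, h2]
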